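-- pv_equiv track=rewrite | github.com/Ahreum0714/study | programmers/level3/파괴되지_않은_건물.py | solution
-- ===== SOURCE A (Python) =====
-- def acc(skill, br_len, bc_len):
--     li = [[0] * (bc_len+1) for _ in range(br_len+1)]
--
--     # 누적합을 위한 이차원 배열
--     for type, r1, c1, r2, c2, degree in skill:
--         li[r1][c1] += -degree if type == 1 else degree
--         li[r1][c2+1] += degree if type == 1 else -degree
--         li[r2+1][c1] += degree if type == 1 else -degree
--         li[r2+1][c2+1] += -degree if type == 1 else degree
--
--     # 행 기준 누적합
--     for i in range(br_len):
--         for j in range(bc_len):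
--             li[i][j+1] += li[i][j]
--
--     # 열 기준 누적합
--     for j in range(bc_len):
--         for i in range(br_len):
--             li[i+1][j] += li[i][j]
--
--     return li
--
-- def solution(board, skill):
--     cnt = 0
--     acc_li = acc(skill, len(board), len(board[0]))
--
--     for r in range(len(board)):
--         for c in range(len(board[r])):
--             board[r][c] += acc_li[r][c]
--             if board[r][c] > 0: cnt += 1
--
--     return cnt
-- ===== SOURCE B (Python) =====
-- def solution(board, skill):
--     # Naive direct accumulation: apply each skill rectangle straight onto board
--     # (clipped to each row's actual length so ragged boards' missing cells are
--     # simply untouched, as in A), then count cells with positive durability.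
--     # Mutates board in place like A does.
--     for t, r1, c1, r2, c2, d in skill:
--         delta = -d if t == 1 else d
--         for r in range(r1, r2 + 1):
--             for c in range(c1, min(c2 + 1, len(board[r]))):
--                 board[r][c] += delta
--     cnt = 0
--     for row in board:
--         for v in row:
--             if v > 0:
--                 cnt += 1
--     return cnt
-- ===== Notes on version B (the rewrite author's own statement) =====
-- stated objective: simpler
-- what changed: Replaces A's 2D difference-array with two prefix-sum passes by direct accumulation: each skill rectangle (clipped to each row's actual length) is added straight onto the board, then one pass counts positive cells.
-- outside the precondition, e.g. on solution([[-3]], [[2, -1, 0, -1, 0, 5]]): A returns 0, B returns 1; on solution([[-3], [1]], [[2, 2, 0, 0, 0, 5]]): A returns 0, B returns 1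
import Mathlib
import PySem

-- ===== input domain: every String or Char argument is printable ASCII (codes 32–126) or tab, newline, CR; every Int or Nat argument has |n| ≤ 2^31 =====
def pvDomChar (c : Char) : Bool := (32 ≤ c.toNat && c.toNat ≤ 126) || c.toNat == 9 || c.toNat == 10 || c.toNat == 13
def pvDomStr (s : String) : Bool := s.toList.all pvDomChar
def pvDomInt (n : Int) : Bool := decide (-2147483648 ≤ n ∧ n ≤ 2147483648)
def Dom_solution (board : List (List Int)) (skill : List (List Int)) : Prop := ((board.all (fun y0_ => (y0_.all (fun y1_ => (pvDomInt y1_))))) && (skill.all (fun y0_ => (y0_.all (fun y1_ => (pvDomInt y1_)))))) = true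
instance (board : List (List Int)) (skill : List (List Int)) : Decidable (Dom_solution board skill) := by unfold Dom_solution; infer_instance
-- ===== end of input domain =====

-- B replaces A's 2D difference-array + two prefix-sum passes by direct accumulation of each
-- skill rectangle onto the board (clipped to each row's actual length), then a single counting
-- pass (objective: simpler). Both A and B mutate `board` in place in Python (same final board);
-- the theorems below are about the return value.

-- ===== PORT A =====
-- `cellA m i j` = m[i][j] read with default 0, `bumpA m i j v` = m[i][j] += v; under Pre_ every
-- index used is in range, so these are exact for the Python list accesses.
def cellA (m : List (List Int)) (i j : Nat) : Int := (m.getD i []).getD j 0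

def bumpA (m : List (List Int)) (i j : Nat) (v : Int) : List (List Int) :=
  m.modify i (fun row => row.modify j (· + v))

-- Python's index rule: a negative index counts from the end
def pyIx (n : Nat) (i : Int) : Int := if i < 0 then (n:Int) + i else i

-- `m[i][j] += v` with Python's negative-index rule on both levels; where Python would raise
-- IndexError the guard makes it a no-op (that computation raises in Python, so nothing is claimed)
def bumpI (m : List (List Int)) (i j v : Int) : List (List Int) :=
  if 0 ≤ pyIx m.length i then
    m.modify (pyIx m.length i).toNat (fun row =>
      if 0 ≤ pyIx row.length j then row.modify (pyIx row.length j).toNat (· + v) else row)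
  else m

-- one iteration of A's first loop (`for type, r1, c1, r2, c2, degree in skill`); under Pre_ all
-- four indices are nonnegative, so `.toNat` is exact
def accStep (m : List (List Int)) (s : List Int) : List (List Int) :=
  match s with
  | [t, r1, c1, r2, c2, d] =>
      let m1 := bumpI m r1 c1 (if t = 1 then -d else d)
      let m2 := bumpI m1 r1 (c2+1) (if t = 1 then d else -d)
      let m3 := bumpI m2 (r2+1) c1 (if t = 1 then d else -d)
      bumpI m3 (r2+1) (c2+1) (if t = 1 then -d else d)
  | _ => m

def accFn (skill : List (List Int)) (brLen bcLen : Nat) : List (List Int) :=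
  let li0 := List.replicate (brLen+1) (List.replicate (bcLen+1) (0:Int))
  let li1 := skill.foldl accStep li0
  let li2 := (List.range brLen).foldl (fun m i =>
      (List.range bcLen).foldl (fun m j => bumpA m i (j+1) (cellA m i j)) m) li1
  (List.range bcLen).foldl (fun m j =>
      (List.range brLen).foldl (fun m i => bumpA m (i+1) j (cellA m i j)) m) li2

def solution (board : List (List Int)) (skill : List (List Int)) : Int :=
  let accLi := accFn skill board.length (board.headD []).length
  ((List.range board.length).foldl (fun (st : List (List Int) × Int) r =>
    (List.range (st.1.getD r []).length).foldl (fun (st : List (List Int) × Int) c =>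
      let b := bumpA st.1 r c (cellA accLi r c)
      (b, st.2 + if cellA b r c > 0 then 1 else 0)) st) (board, 0)).2

-- ===== PORT B =====
-- one iteration of B's skill loop: add delta to every cell of the rectangle, the column range
-- clipped to the current row's actual length (`min(c2 + 1, len(board[r]))`)
-- `len(board[r])` with Python's negative-index rule; 0 where Python raises IndexError
-- (that computation raises in Python, so nothing is claimed there)
def pyRowLen (b : List (List Int)) (r : Int) : Int :=
  if 0 ≤ pyIx b.length r ∧ pyIx b.length r < (b.length:Int)
  then ((b.getD (pyIx b.length r).toNat []).length : Int) else 0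

def rectStep (b : List (List Int)) (s : List Int) : List (List Int) :=
  match s with
  | [t, r1, c1, r2, c2, d] =>
      let delta := if t = 1 then -d else d
      (PySem.List.pyRange r1 (r2+1) 1).foldl (fun b r =>
        (PySem.List.pyRange c1 (min (c2+1) (pyRowLen b r)) 1).foldl
          (fun b c => bumpI b r c delta) b) b
  | _ => b

def solution_alt (board : List (List Int)) (skill : List (List Int)) : Int :=
  let b2 := skill.foldl rectStep board
  b2.foldl (fun cnt row => row.foldl (fun (cnt : Int) v => if v > 0 then cnt + 1 else cnt) cnt) 0

-- ===== PRECONDITION & SPEC =====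
-- Pre_ is the problem's natural domain: a nonempty board whose rows A's final loop can index
-- (row length ≤ len(board[0])+1; longer rows make A raise IndexError) and skill rows
-- [type, r1, c1, r2, c2, degree] describing genuine rectangles
-- (0 ≤ r1 ≤ r2 < len(board), 0 ≤ c1 ≤ c2 < len(board[0])). Ragged boards with SHORT rows are
-- inside Pre_ (both programs leave missing cells untouched). Excluded are inputs on which A
-- raises (empty board, over-long rows, skill rows not of length 6, indices ≥ the bounds) and
-- malformed rectangles (negative indices, r1 > r2, c1 > c2), on which A returns a value only by
-- the accident of Python's negative-index wraparound / of non-cancelling difference-array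
-- corners, while B's rectangle loop naturally does nothing.
def Pre_solution (board : List (List Int)) (skill : List (List Int)) : Prop :=
  board ≠ [] ∧ (∀ row ∈ board, row.length ≤ (board.headD []).length + 1) ∧
  ∀ s ∈ skill, s.length = 6 ∧
    0 ≤ s.getD 1 0 ∧ s.getD 1 0 ≤ s.getD 3 0 ∧ s.getD 3 0 < (board.length : Int) ∧
    0 ≤ s.getD 2 0 ∧ s.getD 2 0 ≤ s.getD 4 0 ∧ s.getD 4 0 < ((board.headD []).length : Int)

instance (board : List (List Int)) (skill : List (List Int)) : Decidable (Pre_solution board skill) := by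
  unfold Pre_solution; infer_instance

def pvWitness_solution : List (List Int) × List (List Int) :=
  ([[1, -2], [3, 4]], [[1, 0, 0, 1, 1, 2], [2, 0, 1, 0, 1, 5]])

def Spec_solution (board : List (List Int)) (skill : List (List Int)) (out : Int) : Prop := out = solution_alt board skill
instance (board : List (List Int)) (skill : List (List Int)) (out : Int) : Decidable (Spec_solution board skill out) := by unfold Spec_solution; infer_instance

-- ===== CLAIM (what is proved, stated in full; the proofs are below) =====
def Claim_equal_solution : Prop := ∀ (board : List (List Int)) (skill : List (List Int)), Dom_solution board skill → Pre_solution board skill → Spec_solution board skill (solution board skill)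

-- ===== LEMMAS AND PROOFS =====

theorem bumpI_nonneg (m : List (List Int)) (i j v : Int) (hi : 0 ≤ i) (hj : 0 ≤ j) :
    bumpI m i j v = bumpA m i.toNat j.toNat v := by
  unfold bumpI bumpA
  rw [show pyIx m.length i = i from if_neg (by omega), if_pos hi]
  congr 1
  funext row
  rw [show pyIx row.length j = j from if_neg (by omega), if_pos hj]

-- matrix shape: R rows, each of length C
def Shaped (m : List (List Int)) (R C : Nat) : Prop :=
  m.length = R ∧ ∀ i : Nat, i < R → (m.getD i []).length = C

-- a well-formed skill row for a board with R rows and reference width C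
def ValidS (s : List Int) (R C : Nat) : Prop :=
  match s with
  | [_, r1, c1, r2, c2, _] =>
      0 ≤ r1 ∧ r1 ≤ r2 ∧ r2 < (R:Int) ∧ 0 ≤ c1 ∧ c1 ≤ c2 ∧ c2 < (C:Int)
  | _ => False

-- effect of one skill row on cell (r, c)
def deltaS (s : List Int) (r c : Nat) : Int :=
  match s with
  | [t, r1, c1, r2, c2, d] =>
      if r1 ≤ (r:Int) ∧ (r:Int) ≤ r2 ∧ c1 ≤ (c:Int) ∧ (c:Int) ≤ c2 then (if t = 1 then -d else d) else 0
  | _ => 0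

def effS (skill : List (List Int)) (r c : Nat) : Int := (skill.map (fun s => deltaS s r c)).sum

-- contribution of one skill row to A's difference array at (i, j)
def cornerS (s : List Int) (i j : Nat) : Int :=
  match s with
  | [t, r1, c1, r2, c2, d] =>
      (if t = 1 then -d else d) * ((if (i:Int) = r1 then 1 else 0) - (if (i:Int) = r2+1 then 1 else 0))
        * ((if (j:Int) = c1 then 1 else 0) - (if (j:Int) = c2+1 then 1 else 0))
  | _ => 0

theorem getD_modify {α : Type} (l : List α) (i : Nat) (f : α → α) (k : Nat) (d : α) :
    (l.modify i f).getD k d = if i = k ∧ k < l.length then f (l.getD k d) else l.getD k d := by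
  rw [List.getD_eq_getElem?_getD, List.getElem?_modify, List.getD_eq_getElem?_getD]
  by_cases h : k < l.length
  · rw [List.getElem?_eq_getElem h]
    by_cases hik : i = k <;> simp [hik, h]
  · rw [List.getElem?_eq_none (by omega)]
    simp [h]

theorem cellA_bumpA (m : List (List Int)) (i j : Nat) (v : Int) (i' j' : Nat)
    (hi : i < m.length) (hj : j < (m.getD i []).length) :
    cellA (bumpA m i j v) i' j' = if i' = i ∧ j' = j then cellA m i' j' + v else cellA m i' j' := by
  unfold cellA bumpA
  rw [getD_modify]
  by_cases hii : i' = i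
  · subst hii
    simp only [hi, and_true, true_and, if_true]
    rw [getD_modify]
    by_cases hjj : j' = j
    · subst hjj
      rw [if_pos ⟨rfl, hj⟩, if_pos rfl]
    · simp [hjj, Ne.symm hjj]
  · simp [hii, Ne.symm hii]

theorem shaped_bumpA {m : List (List Int)} {R C : Nat} (h : Shaped m R C) (i j : Nat) (v : Int) :
    Shaped (bumpA m i j v) R C := by
  obtain ⟨hlen, hrow⟩ := h
  refine ⟨by simpa [bumpA] using hlen, fun k hk => ?_⟩
  rw [bumpA, getD_modify]
  by_cases hki : i = k
  · subst hki
    simp only [true_and]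
    split
    · rw [List.length_modify]; exact hrow _ hk
    · exact hrow _ hk
  · simp only [hki, false_and, if_neg, not_false_iff]
    exact hrow _ hk

theorem foldl_cell_add (Inv : List (List Int) → Prop) (Q : Nat → Nat → Prop)
    (f : List (List Int) → List Int → List (List Int))
    (g : List Int → Nat → Nat → Int) (P : List Int → Prop)
    (hs : ∀ m s, P s → Inv m → Inv (f m s))
    (hc : ∀ m s, P s → Inv m → ∀ i j, Q i j →
      cellA (f m s) i j = cellA m i j + g s i j) :
    ∀ (L : List (List Int)) (m : List (List Int)), (∀ s ∈ L, P s) → Inv m →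
      Inv (L.foldl f m) ∧ ∀ i j, Q i j →
        cellA (L.foldl f m) i j = cellA m i j + (L.map (fun s => g s i j)).sum := by
  intro L
  induction L with
  | nil => intro m _ hm; exact ⟨hm, fun i j _ => by simp⟩
  | cons s L ih =>
    intro m hP hm
    have hPs : P s := hP s (by simp)
    obtain ⟨h1, h2⟩ := ih (f m s) (fun x hx => hP x (by simp [hx])) (hs m s hPs hm)
    refine ⟨h1, fun i j hq => ?_⟩
    rw [List.foldl_cons] at *
    rw [h2 i j hq, hc m s hPs hm i j hq]
    simp [add_assoc]

theorem exists_six_of_valid {s : List Int} {R C : Nat} (hval : ValidS s R C) :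
    ∃ t r1 c1 r2 c2 d, s = [t, r1, c1, r2, c2, d] := by
  rcases s with _ | ⟨t, _ | ⟨r1, _ | ⟨c1, _ | ⟨r2, _ | ⟨c2, _ | ⟨d, _ | ⟨x, s⟩⟩⟩⟩⟩⟩⟩ <;>
    first
      | exact ⟨_, _, _, _, _, _, rfl⟩
      | exact absurd hval (by simp [ValidS])

theorem shaped_accStep {R C : Nat} (m : List (List Int)) (s : List Int)
    (hval : ValidS s R C) (hm : Shaped m (R+1) (C+1)) : Shaped (accStep m s) (R+1) (C+1) := by
  obtain ⟨t, r1, c1, r2, c2, d, rfl⟩ := exists_six_of_valid hval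
  simp only [ValidS] at hval
  obtain ⟨h1, h2, h3, h4, h5, h6⟩ := hval
  simp only [accStep]
  rw [bumpI_nonneg _ _ _ _ (by omega) (by omega), bumpI_nonneg _ _ _ _ (by omega) (by omega),
    bumpI_nonneg _ _ _ _ (by omega) (by omega), bumpI_nonneg _ _ _ _ (by omega) (by omega)]
  exact shaped_bumpA (shaped_bumpA (shaped_bumpA (shaped_bumpA hm _ _ _) _ _ _) _ _ _) _ _ _

theorem cellA_accStep {R C : Nat} (m : List (List Int)) (s : List Int)
    (hval : ValidS s R C) (hm : Shaped m (R+1) (C+1)) (i j : Nat) (_hi : i < R+1) (_hj : j < C+1) :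
    cellA (accStep m s) i j = cellA m i j + cornerS s i j := by
  obtain ⟨t, r1, c1, r2, c2, d, rfl⟩ := exists_six_of_valid hval
  simp only [ValidS] at hval
  obtain ⟨hr1, hr12, hr2, hc1, hc12, hc2⟩ := hval
  have h02 : 0 ≤ r2 := le_trans hr1 hr12
  have h04 : 0 ≤ c2 := le_trans hc1 hc12
  lift r1 to ℕ using hr1 with a1
  lift r2 to ℕ using h02 with a2
  lift c1 to ℕ using hc1 with b1
  lift c2 to ℕ using h04 with b2
  have e2 : ((a2:Int) + 1).toNat = a2 + 1 := by omega
  have e4 : ((b2:Int) + 1).toNat = b2 + 1 := by omega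
  have hm1 := shaped_bumpA hm a1 b1 (if t = 1 then -d else d)
  have hm2 := shaped_bumpA hm1 a1 (b2+1) (if t = 1 then d else -d)
  have hm3 := shaped_bumpA hm2 (a2+1) b1 (if t = 1 then d else -d)
  simp only [accStep]
  rw [bumpI_nonneg _ _ _ _ (by omega) (by omega), bumpI_nonneg _ _ _ _ (by omega) (by omega),
    bumpI_nonneg _ _ _ _ (by omega) (by omega), bumpI_nonneg _ _ _ _ (by omega) (by omega)]
  simp only [Int.toNat_natCast, e2, e4]
  rw [cellA_bumpA _ _ _ _ _ _ (by rw [hm3.1]; omega) (by rw [hm3.2 _ (by omega)]; omega)]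
  rw [cellA_bumpA _ _ _ _ _ _ (by rw [hm2.1]; omega) (by rw [hm2.2 _ (by omega)]; omega)]
  rw [cellA_bumpA _ _ _ _ _ _ (by rw [hm1.1]; omega) (by rw [hm1.2 _ (by omega)]; omega)]
  rw [cellA_bumpA _ _ _ _ _ _ (by rw [hm.1]; omega) (by rw [hm.2 _ (by omega)]; omega)]
  simp only [cornerS]
  split_ifs <;> omega

-- ragged shape: R rows, row i of length L i
def ShapedL (m : List (List Int)) (R : Nat) (L : Nat → Nat) : Prop :=
  m.length = R ∧ ∀ i : Nat, i < R → (m.getD i []).length = L i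

theorem shapedL_bumpA {m : List (List Int)} {R : Nat} {L : Nat → Nat} (h : ShapedL m R L)
    (i j : Nat) (v : Int) : ShapedL (bumpA m i j v) R L := by
  obtain ⟨hlen, hrow⟩ := h
  refine ⟨by simpa [bumpA] using hlen, fun k hk => ?_⟩
  rw [bumpA, getD_modify]
  by_cases hki : i = k
  · subst hki
    simp only [true_and]
    split
    · rw [List.length_modify]; exact hrow _ hk
    · exact hrow _ hk
  · simp only [hki, false_and, if_neg, not_false_iff]
    exact hrow _ hk

theorem foldl_bump_cols {R : Nat} {L : Nat → Nat} (v : Int) (r : Int) (hr0 : 0 ≤ r)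
    (hrR : r < (R:Int)) :
    ∀ (n : Nat) (lo hi : Int), (hi - lo).toNat = n → 0 ≤ lo → hi ≤ (L r.toNat : Int) →
    ∀ m, ShapedL m R L →
      ShapedL ((PySem.List.pyRange lo hi 1).foldl (fun b c => bumpI b r c v) m) R L ∧
      ∀ i j, i < R → j < L i →
        cellA ((PySem.List.pyRange lo hi 1).foldl (fun b c => bumpI b r c v) m) i j
          = cellA m i j + if i = r.toNat ∧ lo ≤ (j:Int) ∧ (j:Int) < hi then v else 0 := by
  intro n
  induction n with
  | zero =>
    intro lo hi h0 hlo hhi m hm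
    rw [PySem.List.pyRange_one_eq_nil (by omega)]
    exact ⟨hm, fun i j hi' hj' => by rw [if_neg (by omega)]; simp⟩
  | succ n ih =>
    intro lo hi h0 hlo hhi m hm
    rw [PySem.List.pyRange_one_cons (by omega)]
    rw [List.foldl_cons]
    simp only [show bumpI m r lo v = bumpA m r.toNat lo.toNat v from
      bumpI_nonneg _ _ _ _ (by omega) (by omega)]
    have hin1 : r.toNat < m.length := by rw [hm.1]; omega
    have hin2 : lo.toNat < (m.getD r.toNat []).length := by rw [hm.2 _ (by omega)]; omega
    have hm' := shapedL_bumpA hm r.toNat lo.toNat v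
    obtain ⟨hsh, hcell⟩ := ih (lo+1) hi (by omega) (by omega) hhi _ hm'
    refine ⟨hsh, fun i j hi' hj' => ?_⟩
    rw [hcell i j hi' hj', cellA_bumpA _ _ _ _ _ _ hin1 hin2]
    split_ifs <;> omega

theorem foldl_bump_rows {R : Nat} {L : Nat → Nat} (v : Int) (c1 c2 : Int) (h0c : 0 ≤ c1) :
    ∀ (n : Nat) (lo hi : Int), (hi - lo).toNat = n → 0 ≤ lo → hi ≤ (R:Int) →
    ∀ m, ShapedL m R L →
      ShapedL ((PySem.List.pyRange lo hi 1).foldl (fun b r =>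
        (PySem.List.pyRange c1 (min (c2+1) (pyRowLen b r)) 1).foldl
          (fun b c => bumpI b r c v) b) m) R L ∧
      ∀ i j, i < R → j < L i →
        cellA ((PySem.List.pyRange lo hi 1).foldl (fun b r =>
          (PySem.List.pyRange c1 (min (c2+1) (pyRowLen b r)) 1).foldl
            (fun b c => bumpI b r c v) b) m) i j
          = cellA m i j + if (lo ≤ (i:Int) ∧ (i:Int) < hi) ∧ c1 ≤ (j:Int) ∧ (j:Int) < c2+1 then v else 0 := by
  intro n
  induction n with
  | zero =>
    intro lo hi h0 hlo hhi m hm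
    rw [PySem.List.pyRange_one_eq_nil (a := lo) (b := hi) (by omega)]
    exact ⟨hm, fun i j hi' hj' => by rw [if_neg (by omega)]; simp⟩
  | succ n ih =>
    intro lo hi h0 hlo hhi m hm
    rw [PySem.List.pyRange_one_cons (a := lo) (b := hi) (by omega)]
    rw [List.foldl_cons]
    have hlen : pyRowLen m lo = ((L lo.toNat : Nat) : Int) := by
      unfold pyRowLen
      rw [show pyIx m.length lo = lo from if_neg (by omega), if_pos ⟨by omega, by rw [hm.1]; omega⟩,
        hm.2 _ (by omega)]
    simp only [hlen]
    obtain ⟨hsh1, hcell1⟩ := foldl_bump_cols v lo (by omega) (by omega)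
      ((min (c2+1) ((L lo.toNat : Nat):Int)) - c1).toNat c1 (min (c2+1) ((L lo.toNat : Nat):Int))
      rfl h0c (by omega) m hm
    obtain ⟨hsh, hcell⟩ := ih (lo+1) hi (by omega) (by omega) hhi _ hsh1
    refine ⟨hsh, fun i j hi' hj' => ?_⟩
    rw [hcell i j hi' hj', hcell1 i j hi' hj']
    rcases eq_or_ne i lo.toNat with h | h
    · subst h
      split_ifs <;> omega
    · split_ifs <;> omega

theorem shaped_rectStep {R C : Nat} {L : Nat → Nat} (m : List (List Int)) (s : List Int)
    (hval : ValidS s R C) (hm : ShapedL m R L) : ShapedL (rectStep m s) R L := by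
  obtain ⟨t, r1, c1, r2, c2, d, rfl⟩ := exists_six_of_valid hval
  simp only [ValidS] at hval
  obtain ⟨h1, h2, h3, h4, h5, h6⟩ := hval
  simp only [rectStep]
  exact (foldl_bump_rows _ c1 c2 h4 ((r2+1) - r1).toNat r1 (r2+1) rfl h1 (by omega) m hm).1

theorem cellA_rectStep {R C : Nat} {L : Nat → Nat} (m : List (List Int)) (s : List Int)
    (hval : ValidS s R C) (hm : ShapedL m R L) (i j : Nat) (hi : i < R) (hj : j < L i) :
    cellA (rectStep m s) i j = cellA m i j + deltaS s i j := by
  obtain ⟨t, r1, c1, r2, c2, d, rfl⟩ := exists_six_of_valid hval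
  simp only [ValidS] at hval
  obtain ⟨h1, h2, h3, h4, h5, h6⟩ := hval
  simp only [rectStep, deltaS]
  rw [(foldl_bump_rows _ c1 c2 h4 ((r2+1) - r1).toNat r1 (r2+1) rfl h1 (by omega) m hm).2 i j hi hj]
  split_ifs <;> omega

-- prefix sums of row i up to column j / of column j up to row i
def psum (m : List (List Int)) (i j : Nat) : Int := ∑ u ∈ Finset.range (j+1), cellA m i u
def csum (m : List (List Int)) (j i : Nat) : Int := ∑ u ∈ Finset.range (i+1), cellA m u j

theorem rowpass_inner {R C : Nat} (i0 : Nat) (hi0 : i0 < R+1) :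
    ∀ (k : Nat), k ≤ C → ∀ m, Shaped m (R+1) (C+1) →
      Shaped ((List.range k).foldl (fun m j => bumpA m i0 (j+1) (cellA m i0 j)) m) (R+1) (C+1) ∧
      ∀ i j, i < R+1 → j < C+1 →
        cellA ((List.range k).foldl (fun m j => bumpA m i0 (j+1) (cellA m i0 j)) m) i j
          = if i = i0 ∧ j ≤ k then psum m i0 j else cellA m i j := by
  intro k
  induction k with
  | zero =>
    intro _ m hm
    refine ⟨by simpa using hm, fun i j hi hj => ?_⟩
    simp only [List.range_zero, List.foldl_nil]
    split_ifs with h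
    · obtain ⟨h1, h2⟩ := h
      have : j = 0 := by omega
      subst this; subst h1
      simp [psum]
    · rfl
  | succ k ih =>
    intro hk m hm
    obtain ⟨hsh, hcell⟩ := ih (by omega) m hm
    rw [List.range_succ, List.foldl_append, List.foldl_cons, List.foldl_nil]
    have hin1 : i0 < ((List.range k).foldl (fun m j => bumpA m i0 (j+1) (cellA m i0 j)) m).length := by
      rw [hsh.1]; omega
    have hin2 : k + 1 < (((List.range k).foldl (fun m j => bumpA m i0 (j+1) (cellA m i0 j)) m).getD i0 []).length := by
      rw [hsh.2 _ hi0]; omega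
    refine ⟨shaped_bumpA hsh _ _ _, fun i j hi hj => ?_⟩
    rw [cellA_bumpA _ _ _ _ _ _ hin1 hin2]
    rw [hcell i0 k hi0 (by omega), hcell i j hi hj]
    by_cases hii : i = i0
    · subst hii
      by_cases hjj : j = k + 1
      · subst hjj
        rw [if_pos ⟨rfl, rfl⟩, if_neg (by omega), if_pos ⟨rfl, le_refl _⟩,
          if_pos ⟨rfl, le_refl _⟩]
        simp only [psum]
        simp only [Finset.sum_range_succ]
        ring
      · rw [if_neg (by omega)]
        split_ifs <;> first | rfl | omega
    · rw [if_neg (by omega), if_neg (by omega), if_neg (by omega)]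

theorem colpass_inner {R C : Nat} (j0 : Nat) (hj0 : j0 < C+1) :
    ∀ (k : Nat), k ≤ R → ∀ m, Shaped m (R+1) (C+1) →
      Shaped ((List.range k).foldl (fun m i => bumpA m (i+1) j0 (cellA m i j0)) m) (R+1) (C+1) ∧
      ∀ i j, i < R+1 → j < C+1 →
        cellA ((List.range k).foldl (fun m i => bumpA m (i+1) j0 (cellA m i j0)) m) i j
          = if j = j0 ∧ i ≤ k then csum m j0 i else cellA m i j := by
  intro k
  induction k with
  | zero =>
    intro _ m hm
    refine ⟨by simpa using hm, fun i j hi hj => ?_⟩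
    simp only [List.range_zero, List.foldl_nil]
    split_ifs with h
    · obtain ⟨h1, h2⟩ := h
      have : i = 0 := by omega
      subst this; subst h1
      simp [csum]
    · rfl
  | succ k ih =>
    intro hk m hm
    obtain ⟨hsh, hcell⟩ := ih (by omega) m hm
    rw [List.range_succ, List.foldl_append, List.foldl_cons, List.foldl_nil]
    have hin1 : k + 1 < ((List.range k).foldl (fun m i => bumpA m (i+1) j0 (cellA m i j0)) m).length := by
      rw [hsh.1]; omega
    have hin2 : j0 < (((List.range k).foldl (fun m i => bumpA m (i+1) j0 (cellA m i j0)) m).getD (k+1) []).length := by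
      rw [hsh.2 _ (by omega)]; omega
    refine ⟨shaped_bumpA hsh _ _ _, fun i j hi hj => ?_⟩
    rw [cellA_bumpA _ _ _ _ _ _ hin1 hin2]
    rw [hcell k j0 (by omega) hj0, hcell i j hi hj]
    by_cases hjj : j = j0
    · subst hjj
      by_cases hii : i = k + 1
      · subst hii
        rw [if_pos ⟨rfl, rfl⟩, if_neg (by omega), if_pos ⟨rfl, le_refl _⟩,
          if_pos ⟨rfl, le_refl _⟩]
        simp only [csum]
        simp only [Finset.sum_range_succ]
        ring
      · rw [if_neg (by omega)]
        split_ifs <;> first | rfl | omega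
    · rw [if_neg (by omega), if_neg (by omega), if_neg (by omega)]

theorem rowpass_outer {R C : Nat} :
    ∀ (K : Nat), K ≤ R → ∀ m, Shaped m (R+1) (C+1) →
      Shaped ((List.range K).foldl (fun m i =>
        (List.range C).foldl (fun m j => bumpA m i (j+1) (cellA m i j)) m) m) (R+1) (C+1) ∧
      ∀ i j, i < R+1 → j < C+1 →
        cellA ((List.range K).foldl (fun m i =>
          (List.range C).foldl (fun m j => bumpA m i (j+1) (cellA m i j)) m) m) i j
          = if i < K then psum m i j else cellA m i j := by
  intro K
  induction K with
  | zero =>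
    intro _ m hm
    exact ⟨by simpa using hm, fun i j hi hj => by simp⟩
  | succ K ih =>
    intro hK m hm
    obtain ⟨hsh, hcell⟩ := ih (by omega) m hm
    rw [List.range_succ, List.foldl_append, List.foldl_cons, List.foldl_nil]
    obtain ⟨hsh', hcell'⟩ := rowpass_inner K (by omega) C (le_refl _) _ hsh
    refine ⟨hsh', fun i j hi hj => ?_⟩
    rw [hcell' i j hi hj]
    by_cases hii : i = K
    · subst hii
      rw [if_pos ⟨rfl, by omega⟩, if_pos (by omega)]
      refine Finset.sum_congr rfl fun u hu => ?_
      rw [hcell i u hi (by simp at hu; omega), if_neg (by omega)]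
    · rw [if_neg (by omega), hcell i j hi hj]
      split_ifs <;> first | rfl | omega

theorem colpass_outer {R C : Nat} :
    ∀ (K : Nat), K ≤ C → ∀ m, Shaped m (R+1) (C+1) →
      Shaped ((List.range K).foldl (fun m j =>
        (List.range R).foldl (fun m i => bumpA m (i+1) j (cellA m i j)) m) m) (R+1) (C+1) ∧
      ∀ i j, i < R+1 → j < C+1 →
        cellA ((List.range K).foldl (fun m j =>
          (List.range R).foldl (fun m i => bumpA m (i+1) j (cellA m i j)) m) m) i j
          = if j < K then csum m j i else cellA m i j := by
  intro K
  induction K with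
  | zero =>
    intro _ m hm
    exact ⟨by simpa using hm, fun i j hi hj => by simp⟩
  | succ K ih =>
    intro hK m hm
    obtain ⟨hsh, hcell⟩ := ih (by omega) m hm
    rw [List.range_succ, List.foldl_append, List.foldl_cons, List.foldl_nil]
    obtain ⟨hsh', hcell'⟩ := colpass_inner K (by omega) R (le_refl _) _ hsh
    refine ⟨hsh', fun i j hi hj => ?_⟩
    rw [hcell' i j hi hj]
    by_cases hjj : j = K
    · subst hjj
      rw [if_pos ⟨rfl, by omega⟩, if_pos (by omega)]
      refine Finset.sum_congr rfl fun u hu => ?_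
      rw [hcell u j (by simp at hu; omega) hj, if_neg (by omega)]
    · rw [if_neg (by omega), hcell i j hi hj]
      split_ifs <;> first | rfl | omega

theorem shaped_zeros (R C : Nat) :
    Shaped (List.replicate (R+1) (List.replicate (C+1) (0:Int))) (R+1) (C+1) := by
  refine ⟨by simp, fun i hi => ?_⟩
  rw [List.getD_eq_getElem?_getD, List.getElem?_replicate, if_pos hi]
  simp

theorem cellA_zeros (R C i j : Nat) :
    cellA (List.replicate (R+1) (List.replicate (C+1) (0:Int))) i j = 0 := by
  unfold cellA
  rcases Nat.lt_or_ge i (R+1) with h | h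
  · rw [List.getD_replicate _ h]
    rcases Nat.lt_or_ge j (C+1) with h2 | h2
    · rw [List.getD_replicate _ h2]
    · rw [List.getD_eq_default _ _ (by simpa using h2)]
  · rw [List.getD_eq_default (List.replicate (R+1) (List.replicate (C+1) (0:Int))) [] (by simpa using h)]
    simp

theorem sum_point (n : Nat) (a : Int) :
    ∑ i ∈ Finset.range n, (if (i:Int) = a then (1:Int) else 0)
      = if 0 ≤ a ∧ a < (n:Int) then 1 else 0 := by
  induction n with
  | zero => rw [if_neg (by omega)]; simp
  | succ n ih =>
    rw [Finset.sum_range_succ, ih]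
    split_ifs <;> omega

theorem corner_prefix {R C : Nat} (s : List Int) (hval : ValidS s R C) (r c : Nat) :
    ∑ i ∈ Finset.range (r+1), ∑ j ∈ Finset.range (c+1), cornerS s i j = deltaS s r c := by
  obtain ⟨t, r1, c1, r2, c2, d, rfl⟩ := exists_six_of_valid hval
  simp only [ValidS] at hval
  obtain ⟨h1, h2, h3, h4, h5, h6⟩ := hval
  simp only [cornerS, deltaS]
  have : ∀ i ∈ Finset.range (r+1),
      ∑ j ∈ Finset.range (c+1),
        (if t = 1 then -d else d) * ((if (i:Int) = r1 then 1 else 0) - (if (i:Int) = r2+1 then 1 else 0))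
          * ((if (j:Int) = c1 then 1 else 0) - (if (j:Int) = c2+1 then 1 else 0))
      = (if t = 1 then -d else d) * ((if (i:Int) = r1 then 1 else 0) - (if (i:Int) = r2+1 then 1 else 0))
          * ((if 0 ≤ c1 ∧ c1 < ((c+1:Nat):Int) then 1 else 0) - (if 0 ≤ c2+1 ∧ c2+1 < ((c+1:Nat):Int) then 1 else 0)) := by
    intro i _
    rw [← Finset.mul_sum, Finset.sum_sub_distrib, sum_point, sum_point]
  rw [Finset.sum_congr rfl this, ← Finset.sum_mul, ← Finset.mul_sum, Finset.sum_sub_distrib,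
    sum_point, sum_point]
  push_cast
  split_ifs <;> omega

theorem sum_swap_list (L : List (List Int)) (n : Nat) (g : List Int → Nat → Int) :
    ∑ i ∈ Finset.range n, (L.map (fun s => g s i)).sum
      = (L.map (fun s => ∑ i ∈ Finset.range n, g s i)).sum := by
  induction L with
  | nil => simp
  | cons s L ih => simp [Finset.sum_add_distrib, ih]

theorem cellA_accFn {R C : Nat} (skill : List (List Int))
    (hval : ∀ s ∈ skill, ValidS s R C) (r c : Nat) (hr : r < R) (hc : c < C) :
    cellA (accFn skill R C) r c = effS skill r c := by
  obtain ⟨hsh1, hcell1⟩ := foldl_cell_add (fun m => Shaped m (R+1) (C+1))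
    (fun i j => i < R+1 ∧ j < C+1) accStep cornerS (fun s => ValidS s R C)
    (fun m s hs hm => shaped_accStep m s hs hm)
    (fun m s hs hm i j hq => cellA_accStep m s hs hm i j hq.1 hq.2)
    skill _ hval (shaped_zeros R C)
  obtain ⟨hsh2, hcell2⟩ := rowpass_outer R (le_refl _) _ hsh1
  obtain ⟨hsh3, hcell3⟩ := colpass_outer C (le_refl _) _ hsh2
  show cellA ((List.range C).foldl _ _) r c = _
  rw [hcell3 r c (by omega) (by omega), if_pos hc]
  unfold csum
  have h1 : ∀ u ∈ Finset.range (r+1), cellA ((List.range R).foldl (fun m i =>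
      (List.range C).foldl (fun m j => bumpA m i (j+1) (cellA m i j)) m)
      (skill.foldl accStep (List.replicate (R+1) (List.replicate (C+1) (0:Int))))) u c
      = ∑ w ∈ Finset.range (c+1), (skill.map (fun s => cornerS s u w)).sum := by
    intro u hu
    simp only [Finset.mem_range] at hu
    rw [hcell2 u c (by omega) (by omega), if_pos (by omega)]
    unfold psum
    refine Finset.sum_congr rfl fun w hw => ?_
    simp only [Finset.mem_range] at hw
    rw [hcell1 u w ⟨by omega, by omega⟩, cellA_zeros, zero_add]
  rw [Finset.sum_congr rfl h1]
  have h2 : ∀ u ∈ Finset.range (r+1),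
      ∑ w ∈ Finset.range (c+1), (skill.map (fun s => cornerS s u w)).sum
        = (skill.map (fun s => ∑ w ∈ Finset.range (c+1), cornerS s u w)).sum := by
    intro u _; exact sum_swap_list skill (c+1) (fun s w => cornerS s u w)
  rw [Finset.sum_congr rfl h2, sum_swap_list skill (r+1)
    (fun s u => ∑ w ∈ Finset.range (c+1), cornerS s u w)]
  unfold effS
  exact congrArg List.sum (List.map_congr_left fun s hs => corner_prefix s (hval s hs) r c)

theorem rowcount (row : List Int) :
    ∀ (init : Int), row.foldl (fun (cnt : Int) v => if v > 0 then cnt + 1 else cnt) init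
      = init + ∑ c ∈ Finset.range row.length, (if row.getD c 0 > 0 then (1:Int) else 0) := by
  induction row with
  | nil => intro init; simp
  | cons v vs ih =>
    intro init
    rw [List.foldl_cons, ih]
    rw [List.length_cons, Finset.sum_range_succ']
    simp only [List.getD_cons_succ, List.getD_cons_zero]
    split_ifs <;> ring

theorem countB :
    ∀ (m : List (List Int)) (init : Int),
      m.foldl (fun cnt row => row.foldl (fun (cnt : Int) v => if v > 0 then cnt + 1 else cnt) cnt) init
        = init + ∑ r ∈ Finset.range m.length, ∑ c ∈ Finset.range ((m.getD r []).length),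
            (if cellA m r c > 0 then (1:Int) else 0) := by
  intro m
  induction m with
  | nil => intro init; simp
  | cons row rest ih =>
    intro init
    rw [List.foldl_cons, rowcount, ih]
    rw [List.length_cons, Finset.sum_range_succ']
    have h0 : ∀ c, cellA (row :: rest) 0 c = row.getD c 0 := fun c => by
      simp [cellA]
    have hsucc : ∀ r c, cellA (row :: rest) (r+1) c = cellA rest r c := fun r c => by
      simp [cellA]
    have hl0 : ((row :: rest).getD 0 []) = row := by simp
    have hlsucc : ∀ r : Nat, ((row :: rest).getD (r+1) []) = rest.getD r [] := fun r => by simp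
    simp only [h0, hsucc, hl0, hlsucc]
    ring

def stepA (accLi : List (List Int)) (r : Nat) : (List (List Int) × Int) → Nat → (List (List Int) × Int) :=
  fun st c => (bumpA st.1 r c (cellA accLi r c),
    st.2 + if cellA (bumpA st.1 r c (cellA accLi r c)) r c > 0 then 1 else 0)

theorem countA_inner {R : Nat} {L : Nat → Nat} (accLi : List (List Int)) (r : Nat) (hr : r < R) :
    ∀ (k : Nat), k ≤ L r → ∀ (b : List (List Int)) (cnt : Int), ShapedL b R L →
      ShapedL ((List.range k).foldl (stepA accLi r) (b, cnt)).1 R L ∧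
      (∀ i j, i < R → j < L i →
        cellA ((List.range k).foldl (stepA accLi r) (b, cnt)).1 i j
          = cellA b i j + if i = r ∧ j < k then cellA accLi i j else 0) ∧
      ((List.range k).foldl (stepA accLi r) (b, cnt)).2
        = cnt + ∑ c ∈ Finset.range k, (if cellA b r c + cellA accLi r c > 0 then (1:Int) else 0) := by
  intro k
  induction k with
  | zero =>
    intro _ b cnt hm
    refine ⟨by simpa using hm, fun i j hi hj => by simp, by simp⟩
  | succ k ih =>
    intro hk b cnt hm
    obtain ⟨hsh, hcell, hcnt⟩ := ih (by omega) b cnt hm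
    rw [List.range_succ, List.foldl_append, List.foldl_cons, List.foldl_nil]
    have hin1 : r < ((List.range k).foldl (stepA accLi r) (b, cnt)).1.length := by rw [hsh.1]; omega
    have hin2 : k < (((List.range k).foldl (stepA accLi r) (b, cnt)).1.getD r []).length := by
      rw [hsh.2 _ hr]; omega
    refine ⟨shapedL_bumpA hsh _ _ _, fun i j hi hj => ?_, ?_⟩
    · show cellA (bumpA _ r k _) i j = _
      rw [cellA_bumpA _ _ _ _ _ _ hin1 hin2, hcell i j hi hj]
      by_cases hij : i = r ∧ j = k
      · obtain ⟨h1, h2⟩ := hij; subst h1; subst h2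
        rw [if_pos ⟨rfl, rfl⟩, if_neg (by omega), if_pos ⟨rfl, by omega⟩]
        ring
      · rw [if_neg hij]
        split_ifs <;> first | rfl | omega
    · show (_ + if cellA (bumpA _ r k _) r k > 0 then 1 else 0) = _
      rw [cellA_bumpA _ _ _ _ _ _ hin1 hin2, if_pos (show r = r ∧ k = k from ⟨rfl, rfl⟩),
        hcell r k hr (by omega), if_neg (show ¬(r = r ∧ k < k) by omega), add_zero, hcnt,
        Finset.sum_range_succ]
      ring

theorem countA_outer {R : Nat} {L : Nat → Nat} (accLi : List (List Int)) :
    ∀ (K : Nat), K ≤ R → ∀ (b : List (List Int)) (cnt : Int), ShapedL b R L →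
      ShapedL ((List.range K).foldl (fun st r =>
        (List.range (st.1.getD r []).length).foldl (stepA accLi r) st) (b, cnt)).1 R L ∧
      (∀ i j, i < R → j < L i →
        cellA ((List.range K).foldl (fun st r =>
          (List.range (st.1.getD r []).length).foldl (stepA accLi r) st) (b, cnt)).1 i j
          = cellA b i j + if i < K then cellA accLi i j else 0) ∧
      ((List.range K).foldl (fun st r =>
        (List.range (st.1.getD r []).length).foldl (stepA accLi r) st) (b, cnt)).2
        = cnt + ∑ r ∈ Finset.range K, ∑ c ∈ Finset.range (L r),
            (if cellA b r c + cellA accLi r c > 0 then (1:Int) else 0) := by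
  intro K
  induction K with
  | zero =>
    intro _ b cnt hm
    refine ⟨by simpa using hm, fun i j hi hj => by simp, by simp⟩
  | succ K ih =>
    intro hK b cnt hm
    obtain ⟨hsh, hcell, hcnt⟩ := ih (by omega) b cnt hm
    rw [List.range_succ, List.foldl_append, List.foldl_cons, List.foldl_nil]
    have hlen : ((((List.range K).foldl (fun st r =>
        (List.range (st.1.getD r []).length).foldl (stepA accLi r) st) (b, cnt)).1.getD K []).length) = L K :=
      hsh.2 _ (by omega)
    rw [hlen]
    have hpair : ((List.range K).foldl (fun st r =>
        (List.range (st.1.getD r []).length).foldl (stepA accLi r) st) (b, cnt))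
        = (((List.range K).foldl (fun st r =>
        (List.range (st.1.getD r []).length).foldl (stepA accLi r) st) (b, cnt)).1,
          ((List.range K).foldl (fun st r =>
        (List.range (st.1.getD r []).length).foldl (stepA accLi r) st) (b, cnt)).2) := rfl
    rw [hpair]
    obtain ⟨hsh', hcell', hcnt'⟩ := countA_inner accLi K (by omega) (L K) (le_refl _) _ _ hsh
    refine ⟨hsh', fun i j hi hj => ?_, ?_⟩
    · rw [hcell' i j hi hj, hcell i j hi hj]
      by_cases h1 : i < K
      · rw [if_pos h1, if_neg (show ¬(i = K ∧ j < L K) from by omega), add_zero,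
          if_pos (show i < K+1 from by omega)]
      · by_cases h2 : i = K
        · subst h2
          rw [if_neg h1, if_pos (show i = i ∧ j < L i from ⟨rfl, hj⟩),
            if_pos (show i < i+1 from by omega)]
          ring
        · rw [if_neg h1, if_neg (show ¬(i = K ∧ j < L K) from by omega),
            if_neg (show ¬ i < K+1 from by omega)]
          ring
    · rw [hcnt', hcnt, Finset.sum_range_succ]
      have : ∀ c ∈ Finset.range (L K),
          (if cellA ((List.range K).foldl (fun st r =>
            (List.range (st.1.getD r []).length).foldl (stepA accLi r) st) (b, cnt)).1 K c
              + cellA accLi K c > 0 then (1:Int) else 0)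
          = if cellA b K c + cellA accLi K c > 0 then (1:Int) else 0 := by
        intro c hc
        simp only [Finset.mem_range] at hc
        rw [hcell K c (by omega) hc, if_neg (show ¬ K < K by omega), add_zero]
      rw [Finset.sum_congr rfl this]
      ring

theorem exists_six_of_len {s : List Int} (h : s.length = 6) :
    ∃ t r1 c1 r2 c2 d, s = [t, r1, c1, r2, c2, d] := by
  rcases s with _ | ⟨t, _ | ⟨r1, _ | ⟨c1, _ | ⟨r2, _ | ⟨c2, _ | ⟨d, _ | ⟨x, s⟩⟩⟩⟩⟩⟩⟩ <;>
    first
      | exact ⟨_, _, _, _, _, _, rfl⟩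
      | simp at h

theorem corner_rowsum {R C : Nat} (s : List Int) (hval : ValidS s R C)
    (i : Nat) : ∑ j ∈ Finset.range (C+1), cornerS s i j = 0 := by
  obtain ⟨t, r1, c1, r2, c2, d, rfl⟩ := exists_six_of_valid hval
  simp only [ValidS] at hval
  obtain ⟨h1, h2, h3, h4, h5, h6⟩ := hval
  simp only [cornerS]
  rw [← Finset.mul_sum, Finset.sum_sub_distrib, sum_point, sum_point]
  split_ifs <;> omega

theorem deltaS_lastcol {R C : Nat} (s : List Int) (hval : ValidS s R C)
    (r : Nat) : deltaS s r C = 0 := by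
  obtain ⟨t, r1, c1, r2, c2, d, rfl⟩ := exists_six_of_valid hval
  simp only [ValidS] at hval
  obtain ⟨h1, h2, h3, h4, h5, h6⟩ := hval
  simp only [deltaS]
  rw [if_neg (by omega)]

theorem effS_lastcol {R C : Nat} (skill : List (List Int))
    (hval : ∀ s ∈ skill, ValidS s R C) (r : Nat) : effS skill r C = 0 := by
  unfold effS
  rw [List.sum_eq_zero]
  intro x hx
  simp only [List.mem_map] at hx
  obtain ⟨s, hs, rfl⟩ := hx
  exact deltaS_lastcol s (hval s hs) r

theorem cellA_accFn_lastcol {R C : Nat} (skill : List (List Int))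
    (hval : ∀ s ∈ skill, ValidS s R C) (r : Nat) (hr : r < R) :
    cellA (accFn skill R C) r C = 0 := by
  obtain ⟨hsh1, hcell1⟩ := foldl_cell_add (fun m => Shaped m (R+1) (C+1))
    (fun i j => i < R+1 ∧ j < C+1) accStep cornerS (fun s => ValidS s R C)
    (fun m s hs hm => shaped_accStep m s hs hm)
    (fun m s hs hm i j hq => cellA_accStep m s hs hm i j hq.1 hq.2)
    skill _ hval (shaped_zeros R C)
  obtain ⟨hsh2, hcell2⟩ := rowpass_outer R (le_refl _) _ hsh1
  obtain ⟨hsh3, hcell3⟩ := colpass_outer C (le_refl _) _ hsh2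
  show cellA ((List.range C).foldl _ _) r C = _
  rw [hcell3 r C (by omega) (by omega), if_neg (by omega),
    hcell2 r C (by omega) (by omega), if_pos hr]
  unfold psum
  have h1 : ∀ w ∈ Finset.range (C+1),
      cellA (skill.foldl accStep (List.replicate (R+1) (List.replicate (C+1) (0:Int)))) r w
        = (skill.map (fun s => cornerS s r w)).sum := by
    intro w hw
    simp only [Finset.mem_range] at hw
    rw [hcell1 r w ⟨by omega, by omega⟩, cellA_zeros, zero_add]
  rw [Finset.sum_congr rfl h1, sum_swap_list skill (C+1) (fun s w => cornerS s r w)]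
  rw [List.sum_eq_zero]
  intro x hx
  simp only [List.mem_map] at hx
  obtain ⟨s, hs, rfl⟩ := hx
  exact corner_rowsum s (hval s hs) r

-- ===== VERDICT (by name: the statement is the Claim_ definition above) =====
theorem solution_spec : Claim_equal_solution := by
  unfold Claim_equal_solution Spec_solution
  intro board skill _ hpre
  obtain ⟨hne, hrows, hsk⟩ := hpre
  have hshL : ShapedL board board.length (fun i => (board.getD i []).length) :=
    ⟨rfl, fun i _ => rfl⟩
  have hrle : ∀ i, i < board.length → (board.getD i []).length ≤ (board.headD []).length + 1 := by
    intro i hi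
    rw [List.getD_eq_getElem board [] hi]
    exact hrows _ (List.getElem_mem hi)
  have hval : ∀ s ∈ skill, ValidS s board.length (board.headD []).length := by
    intro s hs
    obtain ⟨hlen, h1, h2, h3, h4, h5, h6⟩ := hsk s hs
    obtain ⟨t, r1, c1, r2, c2, d, rfl⟩ := exists_six_of_len hlen
    simp only [List.getD_cons_succ, List.getD_cons_zero] at h1 h2 h3 h4 h5 h6
    exact ⟨h1, h2, h3, h4, h5, h6⟩
  obtain ⟨hshB, hcellB⟩ := foldl_cell_add
    (fun m => ShapedL m board.length (fun i => (board.getD i []).length))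
    (fun i j => i < board.length ∧ j < (board.getD i []).length)
    rectStep deltaS
    (fun s => ValidS s board.length (board.headD []).length)
    (fun m s hs hm => shaped_rectStep m s hs hm)
    (fun m s hs hm i j hq => cellA_rectStep m s hs hm i j hq.1 hq.2)
    skill board hval hshL
  obtain ⟨_, _, hcntA⟩ := countA_outer (accFn skill board.length (board.headD []).length)
    board.length (le_refl _) board 0 hshL
  have hA : solution board skill
      = 0 + ∑ r ∈ Finset.range board.length, ∑ c ∈ Finset.range ((board.getD r []).length),
          (if cellA board r c + cellA (accFn skill board.length (board.headD []).length) r c > 0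
            then (1:Int) else 0) := by
    show ((List.range board.length).foldl (fun st r =>
      (List.range (st.1.getD r []).length).foldl
        (stepA (accFn skill board.length (board.headD []).length) r) st) (board, 0)).2 = _
    exact hcntA
  have hB : solution_alt board skill
      = 0 + ∑ r ∈ Finset.range (skill.foldl rectStep board).length,
          ∑ c ∈ Finset.range (((skill.foldl rectStep board).getD r []).length),
          (if cellA (skill.foldl rectStep board) r c > 0 then (1:Int) else 0) := by
    show (skill.foldl rectStep board).foldl (fun cnt row =>
      row.foldl (fun (cnt : Int) v => if v > 0 then cnt + 1 else cnt) cnt) 0 = _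
    exact countB (skill.foldl rectStep board) 0
  rw [hA, hB, hshB.1, zero_add, zero_add]
  refine Finset.sum_congr rfl fun r hr => ?_
  simp only [Finset.mem_range] at hr
  rw [hshB.2 r hr]
  refine Finset.sum_congr rfl fun c hc => ?_
  simp only [Finset.mem_range] at hc
  rw [hcellB r c ⟨hr, hc⟩]
  have heq : (List.map (fun s => deltaS s r c) skill).sum = effS skill r c := rfl
  rw [heq]
  rcases Nat.lt_or_ge c (board.headD []).length with hcC | hcC
  · rw [cellA_accFn skill hval r c hr hcC]
  · have hceq : c = (board.headD []).length := by
      have := hrle r hr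
      omega
    subst hceq
    rw [cellA_accFn_lastcol skill hval r hr, effS_lastcol skill hval r]
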